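-- pv_equiv track=rewrite | github.com/Eliecer-ctrl/Fundamentos_de_programaci-n_1 | Semana 7/Caracteres_iguales.py | caracteres_iguales
-- ===== SOURCE A (Python) =====
-- def caracteres_iguales(texto1, texto2):
--     if not texto1 or not texto2:
--         return []
--
--     if texto1[0] == texto2[0]:
--         comparacion = [1]
--     else:
--         comparacion = [0]
--
--     resto = caracteres_iguales(texto1[1:], texto2[1:])
--     return comparacion + resto
-- ===== SOURCE B (Python) =====
-- def caracteres_iguales(texto1, texto2):
--     comparacion = []
--     for a, b in zip(texto1, texto2):
--         if a == b:
--             comparacion.append(1)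
--         else:
--             comparacion.append(0)
--     return comparacion
-- ===== Notes on version B (the rewrite author's own statement) =====
-- stated objective: simpler
-- what changed: Replaced the head/tail recursion with repeated string slicing by a single iterative loop over zip(texto1, texto2) appending 1/0 to an accumulator list.
import Mathlib
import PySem

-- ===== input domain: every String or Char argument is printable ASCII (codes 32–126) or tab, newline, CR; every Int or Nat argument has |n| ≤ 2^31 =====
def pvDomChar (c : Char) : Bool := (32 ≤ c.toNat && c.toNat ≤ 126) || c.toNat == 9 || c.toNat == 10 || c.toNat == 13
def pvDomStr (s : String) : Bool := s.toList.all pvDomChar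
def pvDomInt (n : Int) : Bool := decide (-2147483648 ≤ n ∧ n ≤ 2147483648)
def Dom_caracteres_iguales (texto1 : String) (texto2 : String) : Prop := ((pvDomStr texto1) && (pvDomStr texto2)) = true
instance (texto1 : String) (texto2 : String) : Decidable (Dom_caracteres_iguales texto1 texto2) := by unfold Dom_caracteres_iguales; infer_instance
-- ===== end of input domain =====

-- B replaces A's recursion (which re-slices both strings at every step) by one
-- iterative loop over the zipped characters with an accumulator list: simpler and O(n).

-- ===== PORT A =====
-- A recurses on the strings: empty check, compare heads, recurse on the tails.
def caracteresIgualesA : List Char → List Char → List Int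
  | [], _ => []
  | _, [] => []
  | a :: xs, b :: ys =>
      (if a == b then ([1] : List Int) else [0]) ++ caracteresIgualesA xs ys

def caracteres_iguales (texto1 : String) (texto2 : String) : List Int :=
  caracteresIgualesA texto1.toList texto2.toList

-- ===== PORT B =====
-- B iterates over zip(texto1, texto2), appending 1 or 0 to the accumulator.
def caracteres_iguales_alt (texto1 : String) (texto2 : String) : List Int :=
  (List.zip texto1.toList texto2.toList).foldl
    (fun acc p => acc ++ [if p.1 == p.2 then (1 : Int) else 0]) []

-- ===== PRECONDITION & SPEC =====
def Spec_caracteres_iguales (texto1 : String) (texto2 : String) (out : List Int) : Prop := out = caracteres_iguales_alt texto1 texto2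
instance (texto1 : String) (texto2 : String) (out : List Int) : Decidable (Spec_caracteres_iguales texto1 texto2 out) := by unfold Spec_caracteres_iguales; infer_instance

-- ===== CLAIM (what is proved, stated in full; the proofs are below) =====
def Claim_equal_caracteres_iguales : Prop := ∀ (texto1 : String) (texto2 : String), Dom_caracteres_iguales texto1 texto2 → Spec_caracteres_iguales texto1 texto2 (caracteres_iguales texto1 texto2)

-- ===== LEMMAS AND PROOFS =====
theorem foldl_app_acc (zs : List (Char × Char)) (acc : List Int) :
    zs.foldl (fun acc p => acc ++ [if p.1 == p.2 then (1 : Int) else 0]) acc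
      = acc ++ zs.foldl (fun acc p => acc ++ [if p.1 == p.2 then (1 : Int) else 0]) [] := by
  induction zs generalizing acc with
  | nil => simp
  | cons z zs ih =>
      simp only [List.foldl_cons, List.nil_append]
      rw [ih, ih ([if z.1 == z.2 then (1 : Int) else 0])]
      simp

theorem cgA_eq_fold (xs ys : List Char) :
    caracteresIgualesA xs ys
      = (List.zip xs ys).foldl (fun acc p => acc ++ [if p.1 == p.2 then (1 : Int) else 0]) [] := by
  induction xs generalizing ys with
  | nil => simp [caracteresIgualesA]
  | cons a xs ih =>
      cases ys with
      | nil => simp [caracteresIgualesA]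
      | cons b ys =>
          simp only [caracteresIgualesA, List.zip_cons_cons, List.foldl_cons]
          rw [foldl_app_acc, ih]
          split_ifs <;> simp

-- ===== VERDICT (by name: the statement is the Claim_ definition above) =====
theorem caracteres_iguales_spec : Claim_equal_caracteres_iguales := by
  intro t1 t2 _
  unfold Spec_caracteres_iguales caracteres_iguales caracteres_iguales_alt
  exact cgA_eq_fold _ _
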